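-- pv_equiv track=rewrite | github.com/bitwisecook/tcl-lsp | core/minifier/static_substr.py | _find_close_quote
-- ===== SOURCE A (Python) =====
-- def _find_close_quote(source: str, start: int) -> int | None:
--     """Find the closing double-quote starting from *start*."""
--     pos = start
--     while pos < len(source):
--         ch = source[pos]
--         if ch == '"':
--             return pos
--         if ch == "\\":
--             pos += 2
--             continue
--         if ch == "[":
--             depth = 1
--             pos += 1
--             while pos < len(source) and depth > 0:
--                 if source[pos] == "[":
--                     depth += 1
--                 elif source[pos] == "]":
--                     depth -= 1
--                 elif source[pos] == "\\":
--                     pos += 1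
--                 pos += 1
--             continue
--         pos += 1
--     return None
-- ===== SOURCE B (Python) =====
-- def _find_close_quote(source, start):
--     # Single-pass state machine: a depth counter for bracket nesting and a
--     # skip flag for backslash escapes, one character per iteration.
--     pos, depth, skip = start, 0, False
--     while pos < len(source):
--         if skip:
--             skip = False
--         else:
--             ch = source[pos]
--             if ch == "\\":
--                 skip = True
--             elif ch == "[":
--                 depth += 1
--             elif depth > 0:
--                 if ch == "]":
--                     depth -= 1
--             elif ch == '"':
--                 return pos
--         pos += 1
--     return None
-- ===== Notes on version B (the rewrite author's own statement) =====
-- stated objective: simpler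
-- what changed: A's nested while loops (an outer scanner plus a separate inner depth-counting loop for bracket groups) are merged into one single-pass state machine carrying a depth counter and an escape-skip flag, one character per iteration.
import Mathlib
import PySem

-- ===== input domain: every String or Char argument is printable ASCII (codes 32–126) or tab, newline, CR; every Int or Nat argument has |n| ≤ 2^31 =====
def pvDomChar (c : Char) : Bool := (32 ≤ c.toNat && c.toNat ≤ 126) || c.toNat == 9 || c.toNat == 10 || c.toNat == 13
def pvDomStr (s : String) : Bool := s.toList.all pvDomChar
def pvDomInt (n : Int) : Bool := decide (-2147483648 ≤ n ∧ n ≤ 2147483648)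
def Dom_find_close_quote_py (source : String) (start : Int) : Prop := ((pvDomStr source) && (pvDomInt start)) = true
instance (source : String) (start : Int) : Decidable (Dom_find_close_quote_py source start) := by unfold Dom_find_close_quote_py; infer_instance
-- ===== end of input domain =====

-- B merges A's nested loops into one single-pass state machine (depth counter +
-- escape-skip flag); objective: simpler.

-- ===== PORT A =====
-- small named lemmas used by the termination proofs embedded in the ports
theorem pvStep1 (p : Int) : p ≤ p + 1 := le_add_of_nonneg_right (by decide)
theorem pvDec (L p q : Int) (h : p < L) (hq : p + 1 ≤ q) :
    (L - q).toNat < (L - p).toNat :=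
  (Int.toNat_lt_toNat (sub_pos.mpr h)).mpr
    (sub_lt_sub_left (Int.lt_iff_add_one_le.mpr hq) L)
theorem pvDec1 (L p : Int) (h : p < L) : (L - (p + 1)).toNat < (L - p).toNat :=
  pvDec L p (p + 1) h (le_refl _)
theorem pvDec2 (L p : Int) (h : p < L) : (L - (p + 2)).toNat < (L - p).toNat :=
  pvDec L p (p + 2) h (add_le_add (le_refl p) (by decide))

-- inner while loop of A: 'while pos < len(source) and depth > 0: …'
-- (on an out-of-range negative index — where Python raises IndexError, excluded by
-- Pre_ — pyGet? is none and the port returns pos).  The result carries pos ≤ result,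
-- which the outer loop's termination proof needs.
def fcqInnerAux (s : List Char) (pos depth : Int) : {r : Int // pos ≤ r} :=
  if _h : pos < (s.length : Int) ∧ 0 < depth then
    match PySem.List.pyGet? s pos with
    | none => ⟨pos, le_refl _⟩
    | some c =>
      if c = '[' then
        let r := fcqInnerAux s (pos + 1) (depth + 1); ⟨r.1, le_trans (pvStep1 pos) r.2⟩
      else if c = ']' then
        let r := fcqInnerAux s (pos + 1) (depth - 1); ⟨r.1, le_trans (pvStep1 pos) r.2⟩
      else if c = '\\' then
        let r := fcqInnerAux s (pos + 2) depth; ⟨r.1, le_trans (by omega : pos ≤ pos + 2) r.2⟩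
      else
        let r := fcqInnerAux s (pos + 1) depth; ⟨r.1, le_trans (pvStep1 pos) r.2⟩
  else ⟨pos, le_refl _⟩
termination_by ((s.length : Int) - pos).toNat
decreasing_by
  all_goals first
    | exact pvDec2 _ _ _h.1
    | exact pvDec1 _ _ _h.1

def fcqInner (s : List Char) (pos depth : Int) : Int := (fcqInnerAux s pos depth).1

-- outer while loop of A
def fcqOuter (s : List Char) (pos : Int) : Option Int :=
  if _h : pos < (s.length : Int) then
    match PySem.List.pyGet? s pos with
    | none => none
    | some c =>
      if c = '"' then some pos
      else if c = '\\' then fcqOuter s (pos + 2)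
      else if c = '[' then fcqOuter s (fcqInner s (pos + 1) 1)
      else fcqOuter s (pos + 1)
  else none
termination_by ((s.length : Int) - pos).toNat
decreasing_by
  all_goals first
    | exact pvDec2 _ _ _h
    | exact pvDec _ _ _ _h (fcqInnerAux s (pos + 1) 1).2
    | exact pvDec1 _ _ _h

def find_close_quote_py (source : String) (start : Int) : Option Int :=
  fcqOuter source.toList start

-- ===== PORT B =====
-- B's single while loop: state = (pos, depth, skip); one character per iteration.
def fcqB (s : List Char) (pos depth : Int) (skip : Bool) : Option Int :=
  if _h : pos < (s.length : Int) then
    if skip then fcqB s (pos + 1) depth false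
    else
      match PySem.List.pyGet? s pos with
      | none => none
      | some c =>
        if c = '\\' then fcqB s (pos + 1) depth true
        else if c = '[' then fcqB s (pos + 1) (depth + 1) false
        else if 0 < depth then
          if c = ']' then fcqB s (pos + 1) (depth - 1) false
          else fcqB s (pos + 1) depth false
        else if c = '"' then some pos
        else fcqB s (pos + 1) depth false
  else none
termination_by ((s.length : Int) - pos).toNat
decreasing_by all_goals exact pvDec1 _ _ _h

def find_close_quote_py_alt (source : String) (start : Int) : Option Int :=
  fcqB source.toList start 0 false

-- ===== PRECONDITION & SPEC =====
-- Pre_ excludes exactly the inputs where the Python A raises IndexError: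
-- start < -len(source) (Python's negative indexing reaches source[pos] with
-- pos below -len).  It excludes nothing on which A returns a value.
def Pre_find_close_quote_py (source : String) (start : Int) : Prop :=
  -(source.toList.length : Int) ≤ start

instance (source : String) (start : Int) : Decidable (Pre_find_close_quote_py source start) := by
  unfold Pre_find_close_quote_py; infer_instance

def pvWitness_find_close_quote_py : String × Int := ("a[b]\"c", 0)

def Spec_find_close_quote_py (source : String) (start : Int) (out : Option Int) : Prop :=
  out = find_close_quote_py_alt source start

instance (source : String) (start : Int) (out : Option Int) : Decidable (Spec_find_close_quote_py source start out) := by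
  unfold Spec_find_close_quote_py; infer_instance

-- ===== CLAIM (what is proved, stated in full; the proofs are below) =====
def Claim_equal_find_close_quote_py : Prop := ∀ (source : String) (start : Int), Dom_find_close_quote_py source start → Pre_find_close_quote_py source start → Spec_find_close_quote_py source start (find_close_quote_py source start)

-- ===== LEMMAS AND PROOFS =====

-- equation lemmas for fcqInner
theorem fcqInner_stop (s : List Char) (pos depth : Int)
    (h : ¬ (pos < (s.length : Int) ∧ 0 < depth)) : fcqInner s pos depth = pos := by
  unfold fcqInner; rw [fcqInnerAux, dif_neg h]

theorem fcqInner_none (s : List Char) (pos depth : Int)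
    (hg : PySem.List.pyGet? s pos = none) : fcqInner s pos depth = pos := by
  unfold fcqInner; rw [fcqInnerAux]
  split
  · rw [hg]
  · rfl

theorem fcqInner_step (s : List Char) (pos depth : Int) (c : Char)
    (h : pos < (s.length : Int)) (hd : 0 < depth)
    (hg : PySem.List.pyGet? s pos = some c) :
    fcqInner s pos depth =
      (if c = '[' then fcqInner s (pos + 1) (depth + 1)
       else if c = ']' then fcqInner s (pos + 1) (depth - 1)
       else if c = '\\' then fcqInner s (pos + 2) depth
       else fcqInner s (pos + 1) depth) := by
  unfold fcqInner; rw [fcqInnerAux, dif_pos ⟨h, hd⟩, hg]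
  simp only []
  split_ifs <;> rfl

-- equation lemmas for A's outer loop
theorem fcqOuter_stop (s : List Char) (pos : Int)
    (h : ¬ pos < (s.length : Int)) : fcqOuter s pos = none := by
  rw [fcqOuter, dif_neg h]

theorem fcqOuter_none (s : List Char) (pos : Int)
    (hg : PySem.List.pyGet? s pos = none) : fcqOuter s pos = none := by
  rw [fcqOuter]
  split
  · rw [hg]
  · rfl

theorem fcqOuter_step (s : List Char) (pos : Int) (c : Char)
    (h : pos < (s.length : Int)) (hg : PySem.List.pyGet? s pos = some c) :
    fcqOuter s pos =
      (if c = '"' then some pos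
       else if c = '\\' then fcqOuter s (pos + 2)
       else if c = '[' then fcqOuter s (fcqInner s (pos + 1) 1)
       else fcqOuter s (pos + 1)) := by
  rw [fcqOuter, dif_pos h, hg]

-- equation lemmas for B's loop
theorem fcqB_stop (s : List Char) (pos depth : Int) (skip : Bool)
    (h : ¬ pos < (s.length : Int)) : fcqB s pos depth skip = none := by
  rw [fcqB, dif_neg h]

theorem fcqB_none (s : List Char) (pos depth : Int)
    (hg : PySem.List.pyGet? s pos = none) : fcqB s pos depth false = none := by
  rw [fcqB]
  split
  · rw [if_neg (by decide : ¬ (false = true))]; rw [hg]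
  · rfl

-- a pending skip just advances one position (also when pos + 1 is out of range)
theorem fcqB_skip (s : List Char) (pos depth : Int) :
    fcqB s pos depth true = fcqB s (pos + 1) depth false := by
  by_cases h : pos < (s.length : Int)
  · rw [fcqB, dif_pos h, if_pos rfl]
  · rw [fcqB_stop s pos depth true h, fcqB_stop s (pos + 1) depth false (by omega)]

theorem fcqB_step (s : List Char) (pos depth : Int) (c : Char)
    (h : pos < (s.length : Int)) (hg : PySem.List.pyGet? s pos = some c) :
    fcqB s pos depth false =
      (if c = '\\' then fcqB s (pos + 1) depth true
       else if c = '[' then fcqB s (pos + 1) (depth + 1) false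
       else if 0 < depth then
         if c = ']' then fcqB s (pos + 1) (depth - 1) false
         else fcqB s (pos + 1) depth false
       else if c = '"' then some pos
       else fcqB s (pos + 1) depth false) := by
  rw [fcqB, dif_pos h, if_neg (by decide : ¬ (false = true)), hg]

-- B at depth d simulates A's inner loop down to depth 0 followed by A's outer loop.
-- (For d = 0, fcqInner s pos 0 = pos, so this says fcqB s pos 0 false = fcqOuter s pos.)
theorem fcqB_eq (s : List Char) (pos depth : Int) (hd : 0 ≤ depth) :
    fcqB s pos depth false = fcqOuter s (fcqInner s pos depth) := by
  by_cases h : pos < (s.length : Int)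
  · match hg : PySem.List.pyGet? s pos with
    | none =>
      rw [fcqB_none s pos depth hg, fcqInner_none s pos depth hg, fcqOuter_none s pos hg]
    | some c =>
      rw [fcqB_step s pos depth c h hg]
      by_cases hd0 : depth = 0
      · subst hd0
        rw [fcqInner_stop s pos 0 (by omega), fcqOuter_step s pos c h hg]
        by_cases hq : c = '"'
        · subst hq
          rw [if_neg (by decide), if_neg (by decide), if_neg (by decide),
            if_pos rfl, if_pos rfl]
        · by_cases hb : c = '\\'
          · subst hb
            rw [if_pos rfl, if_neg (by decide), if_pos rfl, fcqB_skip,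
              show pos + 1 + 1 = pos + 2 by ring]
            rw [fcqB_eq s (pos + 2) 0 (le_refl _), fcqInner_stop s (pos + 2) 0 (by omega)]
          · by_cases hl : c = '['
            · subst hl
              rw [if_neg (by decide), if_pos rfl, if_neg (by decide),
                if_neg (by decide), if_pos rfl]
              exact fcqB_eq s (pos + 1) 1 (by omega)
            · rw [if_neg hb, if_neg hl, if_neg (by omega), if_neg hq,
                if_neg hq, if_neg hb, if_neg hl]
              rw [fcqB_eq s (pos + 1) 0 (le_refl _), fcqInner_stop s (pos + 1) 0 (by omega)]
      · have hdp : 0 < depth := by omega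
        rw [fcqInner_step s pos depth c h hdp hg]
        by_cases hb : c = '\\'
        · subst hb
          rw [if_pos rfl, if_neg (by decide), if_neg (by decide), if_pos rfl, fcqB_skip,
            show pos + 1 + 1 = pos + 2 by ring]
          exact fcqB_eq s (pos + 2) depth hd
        · by_cases hl : c = '['
          · subst hl
            rw [if_neg (by decide), if_pos rfl, if_pos rfl]
            exact fcqB_eq s (pos + 1) (depth + 1) (by omega)
          · by_cases hr : c = ']'
            · subst hr
              rw [if_neg (by decide), if_neg (by decide), if_pos hdp, if_pos rfl,
                if_neg (by decide), if_pos rfl]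
              exact fcqB_eq s (pos + 1) (depth - 1) (by omega)
            · rw [if_neg hb, if_neg hl, if_pos hdp, if_neg hr,
                if_neg hl, if_neg hr, if_neg hb]
              exact fcqB_eq s (pos + 1) depth hd
  · rw [fcqB_stop s pos depth false h, fcqInner_stop s pos depth (by omega),
      fcqOuter_stop s pos h]
termination_by ((s.length : Int) - pos).toNat
decreasing_by all_goals omega

-- ===== VERDICT (by name: the statement is the Claim_ definition above) =====
theorem find_close_quote_py_spec : Claim_equal_find_close_quote_py := by
  intro source start _ _
  unfold Spec_find_close_quote_py find_close_quote_py find_close_quote_py_alt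
  rw [fcqB_eq source.toList start 0 (le_refl _),
    fcqInner_stop source.toList start 0 (by omega)]
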